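-- pv_equiv track=rewrite | github.com/theabbie/leetcode | minimize-maximum-of-array.py | check
-- ===== SOURCE A (Python) =====
-- def check(arr, M):
--     n = len(arr)
--     extra = 0
--     for i in range(n):
--         if arr[i] > M:
--             if arr[i] - M > extra:
--                 return False
--             else:
--                 extra -= arr[i] - M
--         else:
--             extra += M - arr[i]
--     return True
-- ===== SOURCE B (Python) =====
-- def check(arr, M):
--     # Divide and conquer: for a segment, compute (total, peak) where total is the
--     # sum of (x - M) over the segment and peak is the max prefix sum of those
--     # deficits (including the empty prefix). The array can be leveled below M
--     # iff the peak of the whole array is <= 0.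
--     def solve(seg):
--         if not seg:
--             return (0, 0)
--         if len(seg) == 1:
--             d = seg[0] - M
--             return (d, max(0, d))
--         mid = len(seg) // 2
--         ls, lp = solve(seg[:mid])
--         rs, rp = solve(seg[mid:])
--         return (ls + rs, max(lp, ls + rp))
--     return solve(arr)[1] <= 0
-- ===== Notes on version B (the rewrite author's own statement) =====
-- stated objective: alternative
-- what changed: Replaces A's left-to-right greedy slack scan with early exit by a divide-and-conquer that combines (segment sum, max prefix sum) of the M-shifted array and tests the global peak against 0 once.
import Mathlib
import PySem

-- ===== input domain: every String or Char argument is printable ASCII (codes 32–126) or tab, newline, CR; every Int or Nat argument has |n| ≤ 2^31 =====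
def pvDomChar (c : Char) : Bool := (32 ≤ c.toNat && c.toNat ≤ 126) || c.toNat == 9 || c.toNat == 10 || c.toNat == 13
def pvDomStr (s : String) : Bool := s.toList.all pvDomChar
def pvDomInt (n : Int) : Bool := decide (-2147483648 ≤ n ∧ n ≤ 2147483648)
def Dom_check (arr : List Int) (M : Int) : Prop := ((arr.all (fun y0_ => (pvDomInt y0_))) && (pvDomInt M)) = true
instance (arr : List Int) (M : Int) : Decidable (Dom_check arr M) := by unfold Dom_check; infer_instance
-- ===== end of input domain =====

-- B replaces A's greedy slack scan by a divide-and-conquer combining (segment sum, max prefix sum)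
-- of the M-shifted array and testing the global peak against 0 once (alternative decomposition; no speed claim).

-- ===== PORT A =====
-- A's index loop, carried as structural recursion on the list with the slack `extra`.
def checkGoA (M : Int) : List Int → Int → Bool
  | [], _ => true
  | a :: t, extra =>
    if a > M then
      if a - M > extra then false
      else checkGoA M t (extra - (a - M))
    else
      checkGoA M t (extra + (M - a))

def check (arr : List Int) (M : Int) : Bool := checkGoA M arr 0

-- ===== PORT B =====
-- B's recursive `solve`: on a segment it returns (sum of x-M, max prefix sum of those
-- deficits incl. the empty prefix), combining the two halves seg[:mid] / seg[mid:].
def solveSeg (M : Int) : List Int → Int × Int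
  | [] => (0, 0)
  | [a] => (a - M, max 0 (a - M))
  | a :: b :: t =>
    let seg := a :: b :: t
    let mid := seg.length / 2
    let l := solveSeg M (seg.take mid)
    let r := solveSeg M (seg.drop mid)
    (l.1 + r.1, max l.2 (l.1 + r.2))
termination_by seg => seg.length
decreasing_by
  · simp [List.length_take]; omega
  · simp [List.length_drop]; omega

def check_alt (arr : List Int) (M : Int) : Bool := (solveSeg M arr).2 ≤ 0

-- ===== PRECONDITION & SPEC =====
def Spec_check (arr : List Int) (M : Int) (out : Bool) : Prop := out = check_alt arr M
instance (arr : List Int) (M : Int) (out : Bool) : Decidable (Spec_check arr M out) := by unfold Spec_check; infer_instance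

-- ===== CLAIM (what is proved, stated in full; the proofs are below) =====
def Claim_equal_check : Prop := ∀ (arr : List Int) (M : Int), Dom_check arr M → Spec_check arr M (check arr M)

-- ===== LEMMAS AND PROOFS =====
-- Reference quantities: sum of shifted values and max prefix sum of shifted values.
def sumSh (M : Int) : List Int → Int
  | [] => 0
  | a :: t => (a - M) + sumSh M t

def maxPre (M : Int) : List Int → Int
  | [] => 0
  | a :: t => max 0 ((a - M) + maxPre M t)

theorem maxPre_nonneg (M : Int) (l : List Int) : 0 ≤ maxPre M l := by
  cases l <;> simp [maxPre]

theorem sumSh_append (M : Int) (l r : List Int) : sumSh M (l ++ r) = sumSh M l + sumSh M r := by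
  induction l with
  | nil => simp [sumSh]
  | cons a t ih => simp [sumSh, ih]; ring

theorem maxPre_append (M : Int) (l r : List Int) :
    maxPre M (l ++ r) = max (maxPre M l) (sumSh M l + maxPre M r) := by
  induction l with
  | nil => have := maxPre_nonneg M r; simp [maxPre, sumSh]; omega
  | cons a t ih => simp [maxPre, sumSh, ih]; omega

theorem solveSeg_eq (M : Int) (seg : List Int) :
    solveSeg M seg = (sumSh M seg, maxPre M seg) := by
  fun_induction solveSeg M seg with
  | case1 => simp [sumSh, maxPre]
  | case2 a => simp [sumSh, maxPre]
  | case3 a b t seg mid l r ihT ihD =>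
    simp only [l, r, ihT, ihD]
    have hsplit : (List.take mid seg) ++ (List.drop mid seg) = seg := List.take_append_drop _ _
    rw [← sumSh_append, ← maxPre_append, hsplit]

theorem checkGoA_eq (M : Int) (seg : List Int) : ∀ (extra : Int), 0 ≤ extra →
    checkGoA M seg extra = decide (maxPre M seg ≤ extra) := by
  induction seg with
  | nil => intro extra h; simp [checkGoA, maxPre, h]
  | cons a t ih =>
    intro extra hex
    have hP := maxPre_nonneg M t
    simp only [checkGoA, maxPre]
    by_cases h1 : a > M
    · by_cases h2 : a - M > extra
      · rw [if_pos h1, if_pos h2]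
        have : ¬ (max 0 ((a - M) + maxPre M t) ≤ extra) := by omega
        simp [this]
      · rw [if_pos h1, if_neg h2, ih _ (by omega)]
        have : (max 0 ((a - M) + maxPre M t) ≤ extra) ↔ (maxPre M t ≤ extra - (a - M)) := by omega
        simp [this]
    · rw [if_neg h1, ih _ (by omega)]
      have : (max 0 ((a - M) + maxPre M t) ≤ extra) ↔ (maxPre M t ≤ extra + (M - a)) := by omega
      simp [this]

-- ===== VERDICT (by name: the statement is the Claim_ definition above) =====
theorem check_spec : Claim_equal_check := by
  intro arr M _
  unfold Spec_check check check_alt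
  rw [solveSeg_eq, checkGoA_eq M arr 0 le_rfl]
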